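-- pv_equiv track=rewrite | github.com/Ninja1232123/Matrix-Mechanic | Easy-Training/app.py | format_training_data
-- ===== SOURCE A (Python) =====
-- def format_training_data(text: str, data_format: str) -> list[str]:
--     """Format training data based on selected format."""
--     lines = [line.strip() for line in text.split('\n') if line.strip()]
--
--     if data_format == "completion":
--         return lines
--
--     formatted = []
--     if data_format == "instruction":
--         # Try to parse instruction/response pairs
--         i = 0
--         while i < len(lines):
--             if i + 1 < len(lines):
--                 formatted.append(f"### Instruction:\n{lines[i]}\n\n### Response:\n{lines[i+1]}")
--                 i += 2
--             else:
--                 formatted.append(lines[i])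
--                 i += 1
--     elif data_format == "chat":
--         # Parse as user/assistant pairs
--         i = 0
--         while i < len(lines):
--             if i + 1 < len(lines):
--                 formatted.append(f"<|user|>\n{lines[i]}\n<|assistant|>\n{lines[i+1]}")
--                 i += 2
--             else:
--                 formatted.append(lines[i])
--                 i += 1
--     elif data_format == "qa":
--         # Parse as Q&A pairs
--         i = 0
--         while i < len(lines):
--             if i + 1 < len(lines):
--                 formatted.append(f"Question: {lines[i]}\nAnswer: {lines[i+1]}")
--                 i += 2
--             else:
--                 formatted.append(lines[i])
--                 i += 1
--     else:
--         formatted = lines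
--
--     return formatted if formatted else lines
-- ===== SOURCE B (Python) =====
-- def format_training_data(text: str, data_format: str) -> list[str]:
--     """Format training data based on selected format."""
--     templates = {
--         "instruction": ("### Instruction:\n", "\n\n### Response:\n"),
--         "chat": ("<|user|>\n", "\n<|assistant|>\n"),
--         "qa": ("Question: ", "\nAnswer: "),
--     }
--     tmpl = templates.get(data_format)
--     out = []
--     pending = None
--     # single fused pass: strip/skip, and pair via a one-slot pending buffer
--     for raw in text.split('\n'):
--         line = raw.strip()
--         if not line:
--             continue
--         if tmpl is None:
--             out.append(line)
--         elif pending is None: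
--             pending = line
--         else:
--             out.append(tmpl[0] + pending + tmpl[1] + line)
--             pending = None
--     if pending is not None:
--         out.append(pending)
--     return out
-- ===== Notes on version B (the rewrite author's own statement) =====
-- stated objective: simpler
-- what changed: Replaces A's staged design (build a stripped-line list, then one of three duplicated index-walking while-loops, then a 'formatted or lines' fallback) with a single fused pass over the raw split that strips, skips blanks, and pairs lines through a one-slot pending buffer driven by a (prefix, middle) template tuple looked up once.
import Mathlib
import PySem

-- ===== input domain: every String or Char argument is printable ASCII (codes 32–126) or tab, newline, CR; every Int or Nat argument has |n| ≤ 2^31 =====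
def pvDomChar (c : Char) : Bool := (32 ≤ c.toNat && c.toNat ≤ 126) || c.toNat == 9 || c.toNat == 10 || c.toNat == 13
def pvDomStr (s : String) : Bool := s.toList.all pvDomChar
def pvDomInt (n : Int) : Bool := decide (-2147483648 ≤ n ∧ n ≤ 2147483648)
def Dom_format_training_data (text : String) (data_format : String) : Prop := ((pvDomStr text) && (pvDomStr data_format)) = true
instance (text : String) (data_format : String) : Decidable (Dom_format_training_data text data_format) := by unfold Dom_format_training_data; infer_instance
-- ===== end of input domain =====

-- B fuses A's staged passes (line list, three duplicated index-walking while-loops,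
-- 'formatted or lines' fallback) into one pass with a one-slot pending buffer (simpler).

-- ===== PORT A =====
-- lines = [line.strip() for line in text.split('\n') if line.strip()]  (truthy string = nonempty)
-- split? is none only when the separator is ""; the separator here is "\n", so getD [] is exact
def pvLinesA (text : String) : List String :=
  (((PySem.Str.split? text "\n").getD []).map PySem.Str.strip).filter (fun l => l ≠ "")

-- the 'instruction' while-loop: i advances by 2 while a pair remains, else by 1
def pvLoopInstr : List String → List String
  | a :: b :: rest =>
      ("### Instruction:\n" ++ a ++ "\n\n### Response:\n" ++ b) :: pvLoopInstr rest
  | [a] => [a]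
  | [] => []

-- the 'chat' while-loop
def pvLoopChat : List String → List String
  | a :: b :: rest =>
      ("<|user|>\n" ++ a ++ "\n<|assistant|>\n" ++ b) :: pvLoopChat rest
  | [a] => [a]
  | [] => []

-- the 'qa' while-loop
def pvLoopQa : List String → List String
  | a :: b :: rest =>
      ("Question: " ++ a ++ "\nAnswer: " ++ b) :: pvLoopQa rest
  | [a] => [a]
  | [] => []

def format_training_data (text : String) (data_format : String) : List String :=
  let lines := pvLinesA text
  if data_format = "completion" then lines
  else
    let formatted :=
      if data_format = "instruction" then pvLoopInstr lines
      else if data_format = "chat" then pvLoopChat lines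
      else if data_format = "qa" then pvLoopQa lines
      else lines
    if formatted = [] then lines else formatted   -- 'return formatted if formatted else lines'

-- ===== PORT B =====
-- templates = { name: (prefix, middle), … }  (Python dict literal of tuples)
def pvTemplatesB : PySem.Dict String (String × String) :=
  PySem.Dict.ofList
    [ ("instruction", ("### Instruction:\n", "\n\n### Response:\n"))
    , ("chat", ("<|user|>\n", "\n<|assistant|>\n"))
    , ("qa", ("Question: ", "\nAnswer: ")) ]

-- loop body after the strip/skip: the three branches on tmpl and pending
def pvEmit (tmpl : Option (String × String)) (s : List String × Option String)
    (line : String) : List String × Option String :=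
  match tmpl with
  | none => (s.1 ++ [line], s.2)
  | some (pre, mid) =>
      match s.2 with
      | none => (s.1, some line)
      | some p => (s.1 ++ [pre ++ p ++ mid ++ line], none)

-- one iteration of B's for-loop: strip, skip blank, otherwise emit
def pvStepB (tmpl : Option (String × String)) (s : List String × Option String)
    (raw : String) : List String × Option String :=
  let line := PySem.Str.strip raw
  if line = "" then s else pvEmit tmpl s line

def format_training_data_alt (text : String) (data_format : String) : List String :=
  let tmpl := PySem.Dict.get? pvTemplatesB data_format
  let st := ((PySem.Str.split? text "\n").getD []).foldl (pvStepB tmpl) ([], none)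
  match st.2 with
  | some p => st.1 ++ [p]   -- 'if pending is not None: out.append(pending)'
  | none => st.1

-- ===== PRECONDITION & SPEC =====
def Spec_format_training_data (text : String) (data_format : String) (out : List String) : Prop := out = format_training_data_alt text data_format
instance (text : String) (data_format : String) (out : List String) : Decidable (Spec_format_training_data text data_format out) := by unfold Spec_format_training_data; infer_instance

-- ===== CLAIM (what is proved, stated in full; the proofs are below) =====
def Claim_equal_format_training_data : Prop := ∀ (text : String) (data_format : String), Dom_format_training_data text data_format → Spec_format_training_data text data_format (format_training_data text data_format)

-- ===== LEMMAS AND PROOFS =====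

def pvFinal (s : List String × Option String) : List String :=
  match s.2 with
  | some p => s.1 ++ [p]
  | none => s.1

-- generic pairing loop, parametrized by the pair formatter
def pvLoopF (f : String → String → String) : List String → List String
  | a :: b :: rest => f a b :: pvLoopF f rest
  | [a] => [a]
  | [] => []

theorem pvLoopInstr_eqF (xs : List String) :
    pvLoopInstr xs = pvLoopF (fun a b => "### Instruction:\n" ++ a ++ "\n\n### Response:\n" ++ b) xs := by
  induction xs using pvLoopInstr.induct with
  | case1 a b rest ih => simp [pvLoopInstr, pvLoopF, ih]
  | case2 a => simp [pvLoopInstr, pvLoopF]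
  | case3 => simp [pvLoopInstr, pvLoopF]

theorem pvLoopChat_eqF (xs : List String) :
    pvLoopChat xs = pvLoopF (fun a b => "<|user|>\n" ++ a ++ "\n<|assistant|>\n" ++ b) xs := by
  induction xs using pvLoopChat.induct with
  | case1 a b rest ih => simp [pvLoopChat, pvLoopF, ih]
  | case2 a => simp [pvLoopChat, pvLoopF]
  | case3 => simp [pvLoopChat, pvLoopF]

theorem pvLoopQa_eqF (xs : List String) :
    pvLoopQa xs = pvLoopF (fun a b => "Question: " ++ a ++ "\nAnswer: " ++ b) xs := by
  induction xs using pvLoopQa.induct with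
  | case1 a b rest ih => simp [pvLoopQa, pvLoopF, ih]
  | case2 a => simp [pvLoopQa, pvLoopF]
  | case3 => simp [pvLoopQa, pvLoopF]

-- pvLoopF returns [] only on []
theorem pvLoopF_nil (f : String → String → String) (xs : List String)
    (h : pvLoopF f xs = []) : xs = [] := by
  cases xs with
  | nil => rfl
  | cons a t => cases t <;> simp [pvLoopF] at h

-- B's fused strip/skip pass equals emitting over the stripped, blank-filtered list
theorem pvFold_strip (tmpl : Option (String × String)) (raws : List String) :
    ∀ s, raws.foldl (pvStepB tmpl) s
      = (((raws.map PySem.Str.strip).filter (fun l => l ≠ ""))).foldl (pvEmit tmpl) s := by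
  induction raws with
  | nil => intro s; rfl
  | cons a t ih =>
      intro s
      by_cases h : PySem.Str.strip a = ""
      · simp [pvStepB, h, ih]
      · simp [pvStepB, h, ih]

-- the pending-buffer pass computes the pairing loop
theorem pvFold_pairs (pre mid : String) (xs : List String) :
    ∀ (acc : List String) (pend : Option String),
      pvFinal (xs.foldl (pvEmit (some (pre, mid))) (acc, pend))
        = acc ++ pvLoopF (fun a b => pre ++ a ++ mid ++ b) (pend.elim xs (· :: xs)) := by
  induction xs with
  | nil =>
      intro acc pend
      cases pend <;> simp [pvFinal, pvLoopF]
  | cons a t ih =>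
      intro acc pend
      cases pend with
      | none =>
          simpa [pvEmit] using ih acc (some a)
      | some p =>
          have := ih (acc ++ [pre ++ p ++ mid ++ a]) none
          simpa [pvEmit, pvLoopF] using this

-- with no template the pass just copies lines
theorem pvFold_none (xs : List String) :
    ∀ (acc : List String) (pend : Option String),
      xs.foldl (pvEmit none) (acc, pend) = (acc ++ xs, pend) := by
  induction xs with
  | nil => intro acc pend; simp
  | cons a t ih => intro acc pend; simpa [pvEmit] using ih (acc ++ [a]) pend

theorem pv_get?_of_ne (fmt : String) (h1 : fmt ≠ "instruction") (h2 : fmt ≠ "chat")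
    (h3 : fmt ≠ "qa") : PySem.Dict.get? pvTemplatesB fmt = none := by
  simp [PySem.Dict.get?, pvTemplatesB, PySem.Dict.ofList, PySem.Dict.update,
    PySem.Dict.empty, PySem.Dict.insert]
  exact ⟨Ne.symm h1, Ne.symm h2, Ne.symm h3⟩

-- B, evaluated for a given template lookup result
theorem pvAlt_eq (text fmt : String) :
    format_training_data_alt text fmt
      = match PySem.Dict.get? pvTemplatesB fmt with
        | none => pvLinesA text
        | some (pre, mid) => pvLoopF (fun a b => pre ++ a ++ mid ++ b) (pvLinesA text) := by
  show pvFinal (((PySem.Str.split? text "\n").getD []).foldl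
      (pvStepB (PySem.Dict.get? pvTemplatesB fmt)) ([], none)) = _
  rw [pvFold_strip]
  rcases hg : PySem.Dict.get? pvTemplatesB fmt with _ | ⟨pre, mid⟩
  · rw [pvFold_none]; simp [pvFinal, pvLinesA]
  · rw [pvFold_pairs]; simp [pvLinesA, Option.elim]

-- ===== VERDICT (by name: the statement is the Claim_ definition above) =====
theorem format_training_data_spec : Claim_equal_format_training_data := by
  intro text fmt _
  unfold Spec_format_training_data
  rw [pvAlt_eq]
  by_cases hc : fmt = "completion"
  · subst hc
    rw [pv_get?_of_ne _ (by decide) (by decide) (by decide)]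
    simp [format_training_data]
  · by_cases hi : fmt = "instruction"
    · subst hi
      have hg : PySem.Dict.get? pvTemplatesB "instruction"
          = some ("### Instruction:\n", "\n\n### Response:\n") := rfl
      rw [hg]
      simp only [format_training_data]
      norm_num
      rw [pvLoopInstr_eqF]
      split_ifs with h0
      · rw [pvLoopF_nil _ _ h0]; simp [pvLoopF]
      · rfl
    · by_cases hch : fmt = "chat"
      · subst hch
        have hg : PySem.Dict.get? pvTemplatesB "chat"
            = some ("<|user|>\n", "\n<|assistant|>\n") := rfl
        rw [hg]
        simp only [format_training_data]
        norm_num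
        rw [pvLoopChat_eqF]
        split_ifs with h0
        · rw [pvLoopF_nil _ _ h0]; simp [pvLoopF]
        · rfl
      · by_cases hq : fmt = "qa"
        · subst hq
          have hg : PySem.Dict.get? pvTemplatesB "qa"
              = some ("Question: ", "\nAnswer: ") := rfl
          rw [hg]
          simp only [format_training_data]
          norm_num
          rw [pvLoopQa_eqF]
          split_ifs with h0
          · rw [pvLoopF_nil _ _ h0]; simp [pvLoopF]
          · rfl
        · rw [pv_get?_of_ne _ hi hch hq]
          simp [format_training_data, hc, hi, hch, hq]
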